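-- pv_equiv track=rewrite | github.com/metasci-dev/metasci | src/mathematics/__init__.py | min_above
-- ===== SOURCE A (Python) =====
-- def min_above(x, p):
--     """Finds the entry in a data set that is the lowest value above some threshold point.
--
--     Args:
--         * `x` (numeric sequence): The data set to search in.
--         * `p` (numeric): The threshold point such that p < x_min.
--
--     Returns:
--         * `x_min` (numeric):  The lowest value in x that is still above p.
--           for instance min_above([12.0, 0.0, 1,], 0) = 1.  Returns min(x) if no points
--           are bove p.
--     """
--
--     x_min = min(x)
--     if x_min <= p:
--         x_min = max(x)
--         for n in range(len(x)):
--             if (p < x[n] < x_min):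
--                 x_min = x[n]
--     return x_min
-- ===== SOURCE B (Python) =====
-- def min_above(x, p):
--     """Lowest value in x strictly above p; falls back to max(x) when nothing is above p.
--
--     Simpler decomposition: filter once, then one branch on emptiness (A seeds
--     with max(x) and scans with a running bound)."""
--     above = [e for e in x if e > p]
--     return min(above) if above else max(x)
-- ===== Notes on version B (the rewrite author's own statement) =====
-- stated objective: simpler
-- what changed: B filters the elements strictly above p in one pass and returns min of that subset (max(x) if it is empty), replacing A's min(x) early-return plus index loop with a running upper bound seeded by max(x).
import Mathlib
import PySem

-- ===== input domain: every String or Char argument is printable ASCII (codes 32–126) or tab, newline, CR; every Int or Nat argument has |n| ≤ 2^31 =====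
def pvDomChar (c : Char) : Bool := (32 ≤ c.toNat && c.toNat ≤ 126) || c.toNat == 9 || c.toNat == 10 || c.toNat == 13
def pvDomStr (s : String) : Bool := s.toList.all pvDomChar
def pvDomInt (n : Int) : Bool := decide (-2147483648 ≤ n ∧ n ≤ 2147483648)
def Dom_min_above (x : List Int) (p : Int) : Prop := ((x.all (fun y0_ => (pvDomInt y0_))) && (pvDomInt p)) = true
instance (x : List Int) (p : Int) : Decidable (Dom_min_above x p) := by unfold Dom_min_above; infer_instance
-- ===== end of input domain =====

-- B is a simpler decomposition of the same O(n) task: filter the elements above p once,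
-- then branch on emptiness; both raise ValueError on empty x (excluded by Pre_).

-- ===== PORT A =====
def min_above (x : List Int) (p : Int) : Int :=
  match PySem.List.min? x (fun v => v) with
  | none => 0  -- unreachable under Pre_: min([]) raises ValueError
  | some x_min =>
    if x_min ≤ p then
      match PySem.List.max? x (fun v => v) with
      | none => 0  -- unreachable under Pre_
      | some mx =>
        -- for n in range(len(x)): x[n] via pyGetD (n is always in range here)
        (PySem.List.pyRange 0 (x.length : Int) 1).foldl
          (fun x_min n =>
            if p < PySem.List.pyGetD x n 0 ∧ PySem.List.pyGetD x n 0 < x_min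
            then PySem.List.pyGetD x n 0 else x_min) mx
    else x_min

-- ===== PORT B =====
def min_above_alt (x : List Int) (p : Int) : Int :=
  let above := x.filter (fun e => decide (p < e))
  match PySem.List.min? above (fun v => v) with
  | some m => m
  | none => (PySem.List.max? x (fun v => v)).getD 0  -- max(x); empty x excluded by Pre_

-- ===== PRECONDITION & SPEC =====
-- Pre_ excludes exactly the empty list, on which Python's min(x)/max(x) raise ValueError.
def Pre_min_above (x : List Int) (p : Int) : Prop := x ≠ []
instance (x : List Int) (p : Int) : Decidable (Pre_min_above x p) := by unfold Pre_min_above; infer_instance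
def pvWitness_min_above : List Int × Int := ([12, 0, 1], 0)

def Spec_min_above (x : List Int) (p : Int) (out : Int) : Prop := out = min_above_alt x p
instance (x : List Int) (p : Int) (out : Int) : Decidable (Spec_min_above x p out) := by unfold Spec_min_above; infer_instance

-- ===== CLAIM (what is proved, stated in full; the proofs are below) =====
def Claim_equal_min_above : Prop := ∀ (x : List Int) (p : Int), Dom_min_above x p → Pre_min_above x p → Spec_min_above x p (min_above x p)

-- ===== LEMMAS AND PROOFS =====

-- A's loop step 'if p < v < acc then v else acc' equals 'if p < v then min acc v else acc'.
theorem step_eq (p acc v : Int) :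
    (if p < v ∧ v < acc then v else acc) = (if p < v then min acc v else acc) := by
  by_cases h : p < v
  · by_cases h2 : v < acc <;> simp [h, h2] <;> omega
  · simp [h]

-- Folding A's step over a list equals folding min over the filtered list.
theorem foldl_step_filter (p : Int) (l : List Int) (acc : Int) :
    l.foldl (fun a v => if p < v ∧ v < a then v else a) acc
      = (l.filter (fun e => decide (p < e))).foldl min acc := by
  induction l generalizing acc with
  | nil => rfl
  | cons h t ih =>
    rw [List.foldl_cons, step_eq, List.filter_cons]
    by_cases hp : p < h
    · simp only [hp, decide_true]
      exact ih (min acc h)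
    · simp only [hp, decide_false]
      exact ih acc

theorem foldl_min_absorb (mx h : Int) (t : List Int) (hle : h ≤ mx) :
    (h :: t).foldl min mx = t.foldl min h := by
  simp [List.foldl_cons, min_eq_right hle]

-- ===== VERDICT (by name: the statement is the Claim_ definition above) =====
theorem min_above_spec : Claim_equal_min_above := by
  intro x p _ hpre
  unfold Spec_min_above min_above min_above_alt
  obtain ⟨m, hm⟩ : ∃ m, PySem.List.min? x (fun v => v) = some m := by
    cases hmin : PySem.List.min? x (fun v => v) with
    | none => exact absurd ((PySem.List.min?_eq_none_iff x _).mp hmin) hpre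
    | some m => exact ⟨m, rfl⟩
  obtain ⟨mx, hmx⟩ : ∃ mx, PySem.List.max? x (fun v => v) = some mx := by
    cases hmax : PySem.List.max? x (fun v => v) with
    | none => exact absurd ((PySem.List.max?_eq_none_iff x _).mp hmax) hpre
    | some mx => exact ⟨mx, rfl⟩
  rw [hm, hmx]
  have hmmem : m ∈ x := PySem.List.min?_mem hm
  have hmmin : ∀ y ∈ x, m ≤ y := PySem.List.min?_isMin hm
  have hmxmax : ∀ y ∈ x, y ≤ mx := PySem.List.max?_isMax hmx
  by_cases hcase : m ≤ p
  · -- A takes the scanning branch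
    simp only [if_pos hcase]
    rw [PySem.List.foldl_pyRange_zero_pyGetD' x 0
          (fun a v => if p < v ∧ v < a then v else a) mx,
        foldl_step_filter]
    cases hf : x.filter (fun e => decide (p < e)) with
    | nil =>
      rw [(PySem.List.min?_eq_none_iff ([] : List Int) (fun v => v)).mpr rfl]
      rfl
    | cons h t =>
      have hhx : h ∈ x := by
        have : h ∈ x.filter (fun e => decide (p < e)) := by rw [hf]; exact List.mem_cons_self
        exact List.mem_of_mem_filter this
      rw [foldl_min_absorb mx h t (hmxmax h hhx)]
      rw [PySem.List.min?_id_cons]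
  · -- min(x) > p: every element is above p, so the filter keeps everything
    rw [not_le] at hcase
    simp only [if_neg (not_le.mpr hcase)]
    have hall : x.filter (fun e => decide (p < e)) = x :=
      List.filter_eq_self.mpr (fun a ha => decide_eq_true (lt_of_lt_of_le hcase (hmmin a ha)))
    rw [hall, hm]
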